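-- pv_equiv track=rewrite | github.com/dmitry-goydin/Misc | Maya.py | divisible_palindromes
-- ===== SOURCE A (Python) =====
-- def divisible_palindromes(max, divisor):
--     result = []
--     num = max - 1
--     while num > 10:
--         if num % divisor == 0 and str(num) == str(num)[::-1]:
--             result.append(num)
--         num -= 1
--     return result
-- ===== SOURCE B (Python) =====
-- def divisible_palindromes(max, divisor):
--     top = max - 1
--     if top <= 10:
--         return []
--     step = abs(divisor)
--     start = top - top % step
--     return [n for n in range(start, 10, -step) if str(n) == str(n)[::-1]]
-- ===== Notes on version B (the rewrite author's own statement) =====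
-- stated objective: faster
-- what changed: Instead of decrementing by 1 from max-1 and testing every integer for divisibility, B enumerates only the multiples of |divisor| with a single descending range (start at the largest multiple of |divisor| <= max-1, step -|divisor|) and filters them for palindromes, so the divisibility test disappears from the loop.
import Mathlib
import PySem

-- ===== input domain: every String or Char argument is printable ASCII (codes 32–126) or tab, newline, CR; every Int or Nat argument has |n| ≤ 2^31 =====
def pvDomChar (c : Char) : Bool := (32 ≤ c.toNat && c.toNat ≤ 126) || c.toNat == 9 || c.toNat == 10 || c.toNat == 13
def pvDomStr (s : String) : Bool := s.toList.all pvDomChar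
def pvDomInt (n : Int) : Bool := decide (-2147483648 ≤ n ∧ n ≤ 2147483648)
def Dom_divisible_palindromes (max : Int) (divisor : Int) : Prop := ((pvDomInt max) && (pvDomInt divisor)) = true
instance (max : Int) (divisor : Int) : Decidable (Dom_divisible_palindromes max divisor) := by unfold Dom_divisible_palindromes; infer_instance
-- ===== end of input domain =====

-- B replaces A's decrement-by-1 scan (testing divisibility of every integer) by a single
-- range over the multiples of |divisor| only, filtered for palindromes (objective: faster by
-- the factor |divisor|, measured on generated inputs).

-- ===== PORT A =====
-- 'str(num) == str(num)[::-1]' — the identical expression appears in both Pythons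
def pvIsPal (n : Int) : Bool :=
  decide (PySem.Str.slice? (PySem.Int.toStr n) none none (-1) = some (PySem.Int.toStr n))

-- the 'while num > 10: … num -= 1' loop of A, carrying 'result'
def pvAGo (divisor : Int) (num : Int) (result : List Int) : List Int :=
  if _h : 10 < num then
    pvAGo divisor (num - 1)
      (if PySem.Int.mod num divisor = 0 ∧ pvIsPal num = true then result ++ [num] else result)
  else result
termination_by (num - 10).toNat
decreasing_by omega

def divisible_palindromes (max : Int) (divisor : Int) : List Int :=
  pvAGo divisor (max - 1) []

-- ===== PORT B =====
-- the same palindrome expression as it occurs in B's comprehension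
def pvIsPalB (n : Int) : Bool :=
  decide (PySem.Str.slice? (PySem.Int.toStr n) none none (-1) = some (PySem.Int.toStr n))

def divisible_palindromes_alt (max : Int) (divisor : Int) : List Int :=
  let top := max - 1
  if top ≤ 10 then []
  else
    let step := |divisor|
    let start := top - PySem.Int.mod top step
    (PySem.List.pyRange start 10 (-step)).filter (fun n => pvIsPalB n)

-- ===== PRECONDITION & SPEC =====
-- Pre_ excludes only divisor = 0 with max ≥ 12, on which A (and B) raise ZeroDivisionError.
def Pre_divisible_palindromes (max : Int) (divisor : Int) : Prop := divisor ≠ 0 ∨ max ≤ 11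
instance (max : Int) (divisor : Int) : Decidable (Pre_divisible_palindromes max divisor) := by
  unfold Pre_divisible_palindromes; infer_instance

def pvWitness_divisible_palindromes : Int × Int := (200, 7)

def Spec_divisible_palindromes (max : Int) (divisor : Int) (out : List Int) : Prop := out = divisible_palindromes_alt max divisor
instance (max : Int) (divisor : Int) (out : List Int) : Decidable (Spec_divisible_palindromes max divisor out) := by unfold Spec_divisible_palindromes; infer_instance

-- ===== CLAIM (what is proved, stated in full; the proofs are below) =====
def Claim_equal_divisible_palindromes : Prop := ∀ (max : Int) (divisor : Int), Dom_divisible_palindromes max divisor → Pre_divisible_palindromes max divisor → Spec_divisible_palindromes max divisor (divisible_palindromes max divisor)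

-- ===== LEMMAS AND PROOFS =====

theorem pvPyRange_negs_nil (a b s : Int) (hs : 0 < s) (h : a ≤ b) :
    PySem.List.pyRange a b (-s) = [] := by
  rw [PySem.List.pyRange_of_neg a b (show (-s : Int) < 0 by omega)]
  simp [show ¬ b < a by omega]

theorem pvPyRange_negs_cons (a b s : Int) (hs : 0 < s) (h : b < a) :
    PySem.List.pyRange a b (-s) = a :: PySem.List.pyRange (a - s) b (-s) := by
  rw [PySem.List.pyRange_of_neg a b (show (-s : Int) < 0 by omega),
      PySem.List.pyRange_of_neg (a - s) b (show (-s : Int) < 0 by omega)]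
  simp only [neg_neg]
  have hq0 : 0 ≤ (a - b - 1) / s := Int.ediv_nonneg (by omega) (by omega)
  have key : ((a - b + s - 1) / s).toNat = ((a - b - 1) / s).toNat + 1 := by
    have h1 : a - b + s - 1 = (a - b - 1) + 1 * s := by ring
    rw [h1, Int.add_mul_ediv_right _ _ (show s ≠ 0 by omega)]
    omega
  have tail : (if b < a - s then ((a - s - b + s - 1) / s).toNat else 0)
      = ((a - b - 1) / s).toNat := by
    split_ifs with h2
    · congr 2; ring
    · have h3 : (a - b - 1) / s = 0 := Int.ediv_eq_zero_of_lt (by omega) (by omega)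
      omega
  rw [if_pos h, tail, key, List.range_succ_eq_map]
  simp only [List.map_cons, List.map_map]
  congr 1
  · push_cast; ring
  · apply List.map_congr_left
    intro k _
    simp only [Function.comp_apply]
    push_cast; ring

theorem pvEmod_pred (num s : Int) (hs : 0 < s) :
    (num - 1) % s = if num % s = 0 then s - 1 else num % s - 1 := by
  have h0 : s * (num / s) + num % s = num := Int.mul_ediv_add_emod num s
  have h1 : 0 ≤ num % s := Int.emod_nonneg num (by omega)
  have h2 : num % s < s := Int.emod_lt_of_pos num hs
  split_ifs with h
  · have hb : s * (num / s - 1) = s * (num / s) - s := by ring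
    have e : num - 1 = (s - 1) + s * (num / s - 1) := by omega
    rw [e, Int.add_mul_emod_self_left]
    exact Int.emod_eq_of_lt (by omega) (by omega)
  · have e : num - 1 = (num % s - 1) + s * (num / s) := by omega
    rw [e, Int.add_mul_emod_self_left]
    exact Int.emod_eq_of_lt (by omega) (by omega)

theorem pvAGo_eq (d : Int) (hd : d ≠ 0) : ∀ (n : Nat) (num : Int) (acc : List Int), num ≤ 10 + n →
    pvAGo d num acc
      = acc ++ (PySem.List.pyRange (num - PySem.Int.mod num |d|) 10 (-|d|)).filter
          (fun n => pvIsPal n) := by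
  have hs : 0 < |d| := abs_pos.mpr hd
  have habs : ∀ m : Int, PySem.Int.mod m d = 0 ↔ PySem.Int.mod m |d| = 0 := by
    intro m
    rw [PySem.Int.mod_eq_zero_iff_dvd, PySem.Int.mod_eq_zero_iff_dvd, abs_dvd]
  intro n
  induction n with
  | zero =>
    intro num acc hnum
    rw [pvAGo, dif_neg (show ¬ 10 < num by omega)]
    have hm : 0 ≤ PySem.Int.mod num |d| := by
      rw [PySem.Int.mod_eq_emod_of_pos hs]; exact Int.emod_nonneg _ (by omega)
    rw [pvPyRange_negs_nil _ _ _ hs (by omega)]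
    simp
  | succ n ih =>
    intro num acc hnum
    by_cases hgt : 10 < num
    · rw [pvAGo, dif_pos hgt]
      have hmod : PySem.Int.mod num |d| = num % |d| := PySem.Int.mod_eq_emod_of_pos hs
      have h1 : 0 ≤ num % |d| := Int.emod_nonneg _ (by omega)
      have h2 : num % |d| < |d| := Int.emod_lt_of_pos _ hs
      have hmod' : PySem.Int.mod (num - 1) |d| = (num - 1) % |d| :=
        PySem.Int.mod_eq_emod_of_pos hs
      by_cases hz : num % |d| = 0
      · have hz' : PySem.Int.mod num |d| = 0 := hmod.trans hz
        have hdv : PySem.Int.mod num d = 0 := (habs num).mpr hz'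
        have hstart : num - PySem.Int.mod num |d| = num := by rw [hz']; ring
        have htail : num - 1 - PySem.Int.mod (num - 1) |d| = num - |d| := by
          rw [hmod', pvEmod_pred _ _ hs, if_pos hz]; ring
        have hih := ih (num - 1)
          (if PySem.Int.mod num d = 0 ∧ pvIsPal num = true then acc ++ [num] else acc)
          (by omega)
        rw [htail] at hih
        rw [hstart, pvPyRange_negs_cons _ _ _ hs (by omega), List.filter_cons, hih]
        by_cases hp : pvIsPal num = true
        · simp [hdv, hp]
        · simp [hdv, hp]
      · have hdv : ¬ PySem.Int.mod num d = 0 := fun hc => hz (hmod ▸ (habs num).mp hc)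
        have htail : num - 1 - PySem.Int.mod (num - 1) |d|
            = num - PySem.Int.mod num |d| := by
          rw [hmod', pvEmod_pred _ _ hs, if_neg hz, hmod]; ring
        have hih := ih (num - 1)
          (if PySem.Int.mod num d = 0 ∧ pvIsPal num = true then acc ++ [num] else acc)
          (by omega)
        rw [htail] at hih
        rw [hih]
        simp [hdv]
    · exact ih num acc (by omega)

-- ===== VERDICT (by name: the statement is the Claim_ definition above) =====
theorem divisible_palindromes_spec : Claim_equal_divisible_palindromes := by
  intro max divisor _ hpre
  show divisible_palindromes max divisor = divisible_palindromes_alt max divisor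
  unfold divisible_palindromes divisible_palindromes_alt
  by_cases htop : max - 1 ≤ 10
  · rw [pvAGo, dif_neg (show ¬ 10 < max - 1 by omega)]
    simp [htop]
  · have hd : divisor ≠ 0 := by
      rcases hpre with h | h
      · exact h
      · omega
    rw [pvAGo_eq divisor hd ((max - 1) - 10).toNat (max - 1) [] (by omega)]
    simp [htop]
    rfl
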